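-- pv_equiv track=rewrite | github.com/estebanhramirez/Compression | PythonCode/LZ77/compressor/functions/manual_reproducible_extension.py | reproducible_extension
-- ===== SOURCE A (Python) =====
-- from typing import Tuple, List
--
-- def reproducible_extension(S: str, j: int) -> Tuple:
--     extensions: List[Tuple] = []
--
--     i: int = 0
--     while i <= j:
--         extension: int = 1
--         while ((extension < len(S)-(j+1)) and (S[i : i+extension] == S[(j+1) : (j+1)+extension])):
--             extension += 1
--
--         extensions.append(((extension-1), i))
--         i = i + 1
--
--     longest_reproducible_extension: Tuple = max(extensions)
--
--     pos: int = longest_reproducible_extension[1]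
--     size: int = longest_reproducible_extension[0]
--     return (pos, size)
-- ===== SOURCE B (Python) =====
-- def reproducible_extension(S, j):
--     n = len(S)
--     cap = n - j - 2
--     if cap < 0:
--         cap = 0
--     best_size = -1
--     best_pos = -1
--     for i in range(j + 1):
--         k = 0
--         while k < cap and i + k < n and S[i + k] == S[j + 1 + k]:
--             k += 1
--         if best_size <= k:
--             best_size = k
--             best_pos = i
--     return (best_pos, best_size)
-- ===== Notes on version B (the rewrite author's own statement) =====
-- stated objective: faster
-- what changed: B replaces A's per-position loop of growing-slice comparisons (re-comparing the whole prefix at every extension step) plus a trailing max() over an accumulated list with a single capped character-by-character LCP scan per position and a running best, so each character is compared once per position and no list is built.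
import Mathlib
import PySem

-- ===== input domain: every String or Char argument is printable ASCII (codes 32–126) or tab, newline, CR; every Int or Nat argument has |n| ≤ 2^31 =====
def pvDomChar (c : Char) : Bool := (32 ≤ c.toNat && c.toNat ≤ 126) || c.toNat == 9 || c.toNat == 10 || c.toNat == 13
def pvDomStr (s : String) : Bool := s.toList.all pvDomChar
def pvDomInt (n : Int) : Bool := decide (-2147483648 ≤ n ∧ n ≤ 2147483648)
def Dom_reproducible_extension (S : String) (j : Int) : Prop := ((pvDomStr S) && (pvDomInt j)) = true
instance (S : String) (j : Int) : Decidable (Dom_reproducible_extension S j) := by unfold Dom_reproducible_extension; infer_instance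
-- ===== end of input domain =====

-- B replaces A's repeated growing-slice comparisons and trailing max() with one
-- capped character-by-character LCP scan per position and a running best (alternative
-- decomposition; asymptotically fewer character comparisons).

-- ===== PORT A =====
-- inner while loop: grows `extension` while the two slices agree
def pvAInner (cs : List Char) (j i extension : Int) : Int :=
  if h : extension < (cs.length : Int) - (j + 1) ∧
      PySem.List.slice cs (some i) (some (i + extension)) =
      PySem.List.slice cs (some (j + 1)) (some ((j + 1) + extension)) then
    pvAInner cs j i (extension + 1)
  else extension
termination_by ((cs.length : Int) - (j + 1) - extension).toNat
decreasing_by obtain ⟨h1, -⟩ := h; omega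

-- outer while loop: appends ((extension-1), i) for i = 0..j
def pvAOuter (cs : List Char) (j i : Int) (acc : List (Int × Int)) : List (Int × Int) :=
  if i ≤ j then pvAOuter cs j (i + 1) (acc ++ [(pvAInner cs j i 1 - 1, i)]) else acc
termination_by (j + 1 - i).toNat
decreasing_by omega

-- Python's `max` on a nonempty list of int pairs compares lexicographically and keeps
-- the first maximum; ported by hand (exact): a running fold with a strict lex test.
def pvLexLt (a b : Int × Int) : Bool := a.1 < b.1 || (a.1 == b.1 && a.2 < b.2)

def reproducible_extension (S : String) (j : Int) : List Int :=
  match pvAOuter S.toList j 0 [] with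
  | [] => []   -- Python: max([]) raises ValueError here (j < 0); excluded by Pre_
  | x :: t =>
    let m := t.foldl (fun acc y => if pvLexLt acc y then y else acc) x
    [m.2, m.1]

-- ===== PORT B =====
-- capped character-wise LCP scan (S[i+k] == S[j+1+k] is exact as pyGet? equality:
-- both indices are nonnegative and in range under the loop guard)
def pvBLcp (cs : List Char) (j cap i k : Int) : Int :=
  if h : k < cap ∧ i + k < (cs.length : Int) ∧
      PySem.List.pyGet? cs (i + k) = PySem.List.pyGet? cs (j + 1 + k) then
    pvBLcp cs j cap i (k + 1)
  else k
termination_by (cap - k).toNat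
decreasing_by obtain ⟨h1, -⟩ := h; omega

def reproducible_extension_alt (S : String) (j : Int) : List Int :=
  let n : Int := (S.toList.length : Int)
  let cap : Int := if n - j - 2 < 0 then 0 else n - j - 2
  let best := (PySem.List.pyRange 0 (j + 1) 1).foldl
    (fun (best : Int × Int) i =>
      let k := pvBLcp S.toList j cap i 0
      if best.1 ≤ k then (k, i) else best) (-1, -1)
  [best.2, best.1]

-- ===== PRECONDITION & SPEC =====
-- Python A raises ValueError (max of an empty sequence) when j < 0; Pre_ excludes exactly that.
def Pre_reproducible_extension (S : String) (j : Int) : Prop := 0 ≤ j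
instance (S : String) (j : Int) : Decidable (Pre_reproducible_extension S j) := by unfold Pre_reproducible_extension; infer_instance
def pvWitness_reproducible_extension : String × Int := ("abab", 1)

def Spec_reproducible_extension (S : String) (j : Int) (out : List Int) : Prop := out = reproducible_extension_alt S j
instance (S : String) (j : Int) (out : List Int) : Decidable (Spec_reproducible_extension S j out) := by unfold Spec_reproducible_extension; infer_instance

-- ===== CLAIM (what is proved, stated in full; the proofs are below) =====
def Claim_equal_reproducible_extension : Prop := ∀ (S : String) (j : Int), Dom_reproducible_extension S j → Pre_reproducible_extension S j → Spec_reproducible_extension S j (reproducible_extension S j)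

-- ===== LEMMAS AND PROOFS =====


-- one step of prefix growth: the (m+1)-prefixes of two suffixes agree iff the
-- m-prefixes agree and the characters at offset m agree
lemma pv_take_succ_agree (l : List Char) (a t m : Nat) (ht : t + (m + 1) ≤ l.length)
    (hinv : (l.drop a).take m = (l.drop t).take m) :
    ((l.drop a).take (m + 1) = (l.drop t).take (m + 1)) ↔
      (a + m < l.length ∧ l[a + m]? = l[t + m]?) := by
  constructor
  · intro h
    have hlen := congrArg List.length h
    simp only [List.length_take, List.length_drop] at hlen
    have hla : a + m < l.length := by omega
    have he := congrArg (fun x => x[m]?) h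
    simp only [List.getElem?_take, List.getElem?_drop, if_pos (Nat.lt_succ_self m)] at he
    exact ⟨hla, he⟩
  · rintro ⟨hla, he⟩
    apply List.ext_getElem?
    intro p
    by_cases hp : p < m
    · have hq := congrArg (fun x => x[p]?) hinv
      simp only [List.getElem?_take, List.getElem?_drop, if_pos hp] at hq
      simp only [List.getElem?_take, List.getElem?_drop, if_pos (by omega : p < m + 1)]
      exact hq
    · by_cases hpm : p = m
      · subst hpm
        simp only [List.getElem?_take, List.getElem?_drop, if_pos (Nat.lt_succ_self p)]
        exact he
      · simp only [List.getElem?_take, if_neg (by omega : ¬ p < m + 1)]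

-- A's growing slice is the e-prefix of the suffix at x
lemma pv_slice_eq_take (cs : List Char) (x e : Int) (hx : 0 ≤ x) (he : 0 ≤ e) :
    PySem.List.slice cs (some x) (some (x + e)) = (cs.drop x.toNat).take e.toNat := by
  rw [PySem.List.slice_toNat cs hx (by omega)]
  congr 1
  omega

-- core loop equivalence: A's slice-growing loop at extension e equals B's capped
-- character scan at offset e-1, plus one, under the invariant that the (e-1)-prefixes agree
theorem pv_inner_agree (cs : List Char) (j i : Int) (hi : 0 ≤ i) (hj : 0 ≤ j)
    (e : Int) (h1 : 1 ≤ e) (heL : e ≤ (cs.length : Int) - (j + 1))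
    (hinv : (cs.drop i.toNat).take (e - 1).toNat = (cs.drop (j + 1).toNat).take (e - 1).toNat) :
    pvAInner cs j i e = pvBLcp cs j ((cs.length : Int) - (j + 1) - 1) i (e - 1) + 1 := by
  rw [pvAInner, pvBLcp]
  have hsl := pv_slice_eq_take cs i e hi (by omega)
  have hsr := pv_slice_eq_take cs (j + 1) e (by omega) (by omega)
  by_cases hL : e < (cs.length : Int) - (j + 1)
  · have ht : (j + 1).toNat + ((e - 1).toNat + 1) ≤ cs.length := by omega
    have key := pv_take_succ_agree cs i.toNat (j + 1).toNat (e - 1).toNat ht hinv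
    have hm1 : (e - 1).toNat + 1 = e.toNat := by omega
    rw [hm1] at key
    have hg1 : PySem.List.pyGet? cs (i + (e - 1)) = cs[i.toNat + (e - 1).toNat]? := by
      rw [PySem.List.pyGet?_of_nonneg cs (by omega)]
      congr 1
      omega
    have hg2 : PySem.List.pyGet? cs (j + 1 + (e - 1)) = cs[(j + 1).toNat + (e - 1).toNat]? := by
      rw [PySem.List.pyGet?_of_nonneg cs (by omega)]
      congr 1
      omega
    by_cases hch : i + (e - 1) < (cs.length : Int) ∧
        PySem.List.pyGet? cs (i + (e - 1)) = PySem.List.pyGet? cs (j + 1 + (e - 1))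
    · have htk : (cs.drop i.toNat).take e.toNat = (cs.drop (j + 1).toNat).take e.toNat := by
        apply key.mpr
        refine ⟨by omega, ?_⟩
        rw [← hg1, ← hg2]
        exact hch.2
      rw [dif_pos ⟨hL, by rw [hsl, hsr]; exact htk⟩,
          dif_pos ⟨by omega, hch.1, hch.2⟩]
      have hrec := pv_inner_agree cs j i hi hj (e + 1) (by omega) (by omega)
        (by
          have : (e + 1 - 1).toNat = e.toNat := by omega
          rw [this]
          exact htk)
      rw [hrec]
      congr 2
      omega
    · rw [dif_neg, dif_neg]
      · omega
      · intro hB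
        exact hch ⟨hB.2.1, hB.2.2⟩
      · rintro ⟨-, hs⟩
        rw [hsl, hsr] at hs
        obtain ⟨hla, hee⟩ := key.mp hs
        exact hch ⟨by omega, by rw [hg1, hg2]; exact hee⟩
  · rw [dif_neg (by rintro ⟨h', -⟩; omega), dif_neg (by rintro ⟨h', -⟩; omega)]
    omega

-- per-position value: A's inner loop minus one equals B's capped LCP from 0
lemma pv_perI (cs : List Char) (j i : Int) (hi : 0 ≤ i) (hj : 0 ≤ j) :
    pvAInner cs j i 1 - 1 =
      pvBLcp cs j
        (if (cs.length : Int) - j - 2 < 0 then 0 else (cs.length : Int) - j - 2) i 0 := by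
  by_cases hL : 1 ≤ (cs.length : Int) - (j + 1)
  · have h := pv_inner_agree cs j i hi hj 1 le_rfl hL (by norm_num)
    norm_num at h
    rw [if_neg (by omega : ¬ (cs.length : Int) - j - 2 < 0)]
    have hcap : (cs.length : Int) - j - 2 = (cs.length : Int) - (j + 1) - 1 := by ring
    rw [hcap]
    omega
  · rw [if_pos (by omega : (cs.length : Int) - j - 2 < 0)]
    rw [pvAInner, pvBLcp]
    rw [dif_neg (by rintro ⟨h', -⟩; omega), dif_neg (by rintro ⟨h', -⟩; omega)]
    norm_num

-- B's scan never goes below its starting offset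
theorem pv_blcp_ge (cs : List Char) (j cap i k : Int) : k ≤ pvBLcp cs j cap i k := by
  rw [pvBLcp]
  split_ifs with h
  · have := pv_blcp_ge cs j cap i (k + 1)
    omega
  · exact le_rfl
termination_by (cap - k).toNat
decreasing_by obtain ⟨h1, -⟩ := h; omega

-- A's outer loop builds the list of (size, position) pairs over range(i, j+1)
theorem pv_outer_spec (cs : List Char) (j i : Int) (acc : List (Int × Int)) :
    pvAOuter cs j i acc =
      acc ++ (PySem.List.pyRange i (j + 1) 1).map (fun x => (pvAInner cs j x 1 - 1, x)) := by
  rw [pvAOuter]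
  split_ifs with h
  · rw [pv_outer_spec cs j (i + 1), PySem.List.pyRange_one_cons (by omega : i < j + 1)]
    simp
  · rw [PySem.List.pyRange_one_eq_nil (by omega)]
    simp
termination_by (j + 1 - i).toNat
decreasing_by omega

-- A's lexicographic running max over (f x, x) pairs equals B's running best,
-- because the position components strictly increase along the range
theorem pv_fold_agree (f : Int → Int) (a b : Int) (acc : Int × Int) (hacc2 : acc.2 < a) :
    ((PySem.List.pyRange a b 1).map (fun x => (f x, x))).foldl
        (fun acc y => if pvLexLt acc y then y else acc) acc
      = (PySem.List.pyRange a b 1).foldl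
          (fun best x => if best.1 ≤ f x then (f x, x) else best) acc := by
  by_cases h : a < b
  · rw [PySem.List.pyRange_one_cons h]
    simp only [List.map_cons, List.foldl_cons]
    have hstep : (if pvLexLt acc (f a, a) then (f a, a) else acc)
        = (if acc.1 ≤ f a then (f a, a) else acc) := by
      by_cases h1 : acc.1 ≤ f a
      · rw [if_pos h1, if_pos (by simp only [pvLexLt]; simp; omega)]
      · rw [if_neg h1, if_neg (by simp only [pvLexLt]; simp; omega)]
    rw [hstep]
    by_cases h1 : acc.1 ≤ f a
    · rw [if_pos h1]
      exact pv_fold_agree f (a + 1) b (f a, a) (by simp)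
    · rw [if_neg h1]
      exact pv_fold_agree f (a + 1) b acc (by omega)
  · rw [PySem.List.pyRange_one_eq_nil (by omega)]
    rfl
termination_by (b - a).toNat
decreasing_by all_goals omega

-- ===== VERDICT (by name: the statement is the Claim_ definition above) =====
theorem reproducible_extension_spec : Claim_equal_reproducible_extension := by
  intro S j _ hpre
  have hj : 0 ≤ j := hpre
  unfold Spec_reproducible_extension reproducible_extension reproducible_extension_alt
  simp only []
  rw [pv_outer_spec]
  rw [PySem.List.pyRange_one_cons (by omega : (0 : Int) < j + 1)]
  set cs := S.toList with hcs
  set cap : Int := if (cs.length : Int) - j - 2 < 0 then 0 else (cs.length : Int) - j - 2 with hcap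
  have hmapeq : (PySem.List.pyRange (0 + 1) (j + 1) 1).map (fun x => (pvAInner cs j x 1 - 1, x))
      = (PySem.List.pyRange (0 + 1) (j + 1) 1).map (fun x => (pvBLcp cs j cap x 0, x)) := by
    apply List.map_congr_left
    intro x hx
    rw [PySem.List.mem_pyRange_one] at hx
    rw [pv_perI cs j x (by omega) hj]
  simp only [List.map_cons, List.foldl_cons, hmapeq]
  rw [pv_perI cs j 0 le_rfl hj, ← hcap]
  rw [if_pos (le_trans (by norm_num) (pv_blcp_ge cs j cap 0 0) : (-1 : Int) ≤ pvBLcp cs j cap 0 0)]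
  have hfold := pv_fold_agree (fun x => pvBLcp cs j cap x 0) (0 + 1) (j + 1)
    (pvBLcp cs j cap 0 0, 0) (by norm_num)
  simp only [List.nil_append, hfold]
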